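-- pv_equiv track=rewrite | github.com/James-HoneyBadger/Time_Warp_Studio | Platforms/Python/time_warp/languages/assembly.py | _upper_preserve_strings
-- ===== SOURCE A (Python) =====
-- def _upper_preserve_strings(line: str) -> str:
--     """Uppercase mnemonics/registers but preserve quoted string literals."""
--     result: list[str] = []
--     in_str = False
--     qchar = ""
--     for ch in line:
--         if in_str:
--             result.append(ch)
--             if ch == qchar:
--                 in_str = False
--         elif ch in ('"', "'"):
--             in_str = True
--             qchar = ch
--             result.append(ch)
--         else:
--             result.append(ch.upper())
--     return "".join(result)
-- ===== SOURCE B (Python) =====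
-- def _upper_preserve_strings(line: str) -> str:
--     """Uppercase mnemonics/registers but preserve quoted string literals.
--
--     Segment-at-a-time: uppercase the run before the next quote, copy the
--     quoted literal verbatim (to end of line if unterminated), recurse on the rest.
--     """
--     i = next((k for k, c in enumerate(line) if c in '"\''), -1)
--     if i == -1:
--         return line.upper()
--     q = line[i]
--     j = line.find(q, i + 1)
--     if j == -1:
--         return line[:i].upper() + line[i:]
--     return line[:i].upper() + line[i:j + 1] + _upper_preserve_strings(line[j + 1:])
-- ===== Notes on version B (the rewrite author's own statement) =====
-- stated objective: alternative
-- what changed: Replaced the per-character state machine (in_str/qchar flags carried through one loop) by a segment-at-a-time recursion: find the next quote, uppercase the plain run with str.upper, copy the whole quoted literal verbatim via str.find, recurse on the remainder.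
import Mathlib
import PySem

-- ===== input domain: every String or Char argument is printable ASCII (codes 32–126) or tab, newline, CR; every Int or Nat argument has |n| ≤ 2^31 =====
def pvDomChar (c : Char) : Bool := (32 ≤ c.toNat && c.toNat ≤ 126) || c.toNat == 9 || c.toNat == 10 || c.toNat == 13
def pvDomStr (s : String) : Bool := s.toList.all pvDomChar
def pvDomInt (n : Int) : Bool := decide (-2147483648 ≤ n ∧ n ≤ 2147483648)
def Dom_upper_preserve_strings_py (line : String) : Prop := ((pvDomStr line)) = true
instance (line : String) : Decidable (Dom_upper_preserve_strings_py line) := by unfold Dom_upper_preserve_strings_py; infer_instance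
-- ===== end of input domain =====

-- B replaces A's per-character in_str/qchar state machine by a segment-at-a-time
-- recursion (uppercase run up to next quote, copy literal verbatim, recurse); alternative, same cost.


-- ===== PORT A =====
-- state = (result, in_str, qchar); Python's initial qchar = "" is never compared while
-- in_str is false, so an arbitrary Char (' ') is a faithful initialisation.
def pvAStep (st : List Char × Bool × Char) (ch : Char) : List Char × Bool × Char :=
  let (result, in_str, qchar) := st
  if in_str then
    (result ++ [ch], (if ch = qchar then false else true), qchar)
  else if ch = '"' ∨ ch = '\'' then
    (result ++ [ch], true, ch)
  else
    (result ++ [PySem.Chars.upperChar ch], in_str, qchar)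

def upper_preserve_strings_py (line : String) : String :=
  String.ofList (line.toList.foldl pvAStep ([], false, ' ')).1

-- ===== PORT B =====
-- Source B: prefix up to first quote (uppercased), the quoted literal verbatim
-- (to end of input if unterminated), recurse past the closing quote.
def pvNotQuote (c : Char) : Bool := !(c = '"' || c = '\'')

def pvAltGo (cs : List Char) : List Char :=
  let pre := cs.takeWhile pvNotQuote
  match h : cs.dropWhile pvNotQuote with
  | [] => pre.map PySem.Chars.upperChar
  | q :: tl =>
    match h2 : tl.dropWhile (fun c => c ≠ q) with
    | [] => pre.map PySem.Chars.upperChar ++ q :: tl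
    | _ :: tl2 =>
      pre.map PySem.Chars.upperChar ++ q :: (tl.takeWhile (fun c => c ≠ q) ++ [q]) ++ pvAltGo tl2
termination_by cs.length
decreasing_by
  have h1 : (cs.dropWhile pvNotQuote).length ≤ cs.length := List.length_dropWhile_le _ _
  have h3 : (tl.dropWhile (fun c => c ≠ q)).length ≤ tl.length := List.length_dropWhile_le _ _
  rw [h] at h1; rw [h2] at h3; simp at h1 h3; omega

def upper_preserve_strings_py_alt (line : String) : String :=
  String.ofList (pvAltGo line.toList)

-- ===== PRECONDITION & SPEC =====
def Spec_upper_preserve_strings_py (line : String) (out : String) : Prop := out = upper_preserve_strings_py_alt line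
instance (line : String) (out : String) : Decidable (Spec_upper_preserve_strings_py line out) := by unfold Spec_upper_preserve_strings_py; infer_instance

-- ===== CLAIM (what is proved, stated in full; the proofs are below) =====
def Claim_equal_upper_preserve_strings_py : Prop := ∀ (line : String), Dom_upper_preserve_strings_py line → Spec_upper_preserve_strings_py line (upper_preserve_strings_py line)

-- ===== LEMMAS AND PROOFS =====

-- state machine as mutual recursion: the common characterisation of both ports
mutual
def pvOut : List Char → List Char
  | [] => []
  | c :: cs => if c = '"' ∨ c = '\'' then c :: pvIn c cs else PySem.Chars.upperChar c :: pvOut cs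
def pvIn (q : Char) : List Char → List Char
  | [] => []
  | c :: cs => if c = q then c :: pvOut cs else c :: pvIn q cs
end

theorem pvFold_eq (cs : List Char) :
    (∀ acc q0, (cs.foldl pvAStep (acc, false, q0)).1 = acc ++ pvOut cs) ∧
    (∀ acc q, (cs.foldl pvAStep (acc, true, q)).1 = acc ++ pvIn q cs) := by
  induction cs with
  | nil => simp [pvOut, pvIn]
  | cons c cs ih =>
    constructor
    · intro acc q0
      by_cases hq : c = '"' ∨ c = '\''
      · simp [pvAStep, hq, pvOut, ih.2]
      · simp [pvAStep, hq, pvOut, ih.1]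
    · intro acc q
      by_cases hc : c = q
      · simp [pvAStep, hc, pvIn, ih.1]
      · simp [pvAStep, hc, pvIn, ih.2]

theorem pvIn_char (q : Char) (cs : List Char) :
    pvIn q cs = cs.takeWhile (fun c => c ≠ q) ++
      (match cs.dropWhile (fun c => c ≠ q) with
       | [] => []
       | _ :: tl2 => q :: pvOut tl2) := by
  induction cs with
  | nil => simp [pvIn]
  | cons c cs ih =>
    by_cases hc : c = q
    · subst hc; simp [pvIn]
    · simp [pvIn, hc, ih]

theorem pvOut_append_of_notQuote (pre rest : List Char) (h : ∀ c ∈ pre, pvNotQuote c) :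
    pvOut (pre ++ rest) = pre.map PySem.Chars.upperChar ++ pvOut rest := by
  induction pre with
  | nil => simp
  | cons c cs ih =>
    have hc := h c (by simp)
    have hq : ¬ (c = '"' ∨ c = '\'') := by
      simp [pvNotQuote] at hc; tauto
    simp only [List.cons_append, pvOut, if_neg hq, List.map_cons]
    rw [ih (fun x hx => h x (by simp [hx]))]

theorem pvOut_eq_altGo (cs : List Char) : pvOut cs = pvAltGo cs := by
  induction cs using pvAltGo.induct with
  | case1 cs h =>
    rw [pvAltGo]
    split
    case _ heq =>
      have hcs : cs.takeWhile pvNotQuote = cs := by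
        have hs := List.takeWhile_append_dropWhile (p := pvNotQuote) (l := cs)
        rw [h] at hs; simpa using hs
      have hall : ∀ c ∈ cs.takeWhile pvNotQuote, pvNotQuote c :=
        fun c hc => List.mem_takeWhile_imp hc
      conv_lhs => rw [← hcs]
      calc pvOut (cs.takeWhile pvNotQuote)
          = pvOut (cs.takeWhile pvNotQuote ++ []) := by simp
        _ = (cs.takeWhile pvNotQuote).map PySem.Chars.upperChar ++ pvOut [] :=
            pvOut_append_of_notQuote _ _ hall
        _ = (cs.takeWhile pvNotQuote).map PySem.Chars.upperChar := by simp [pvOut]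
    case _ heq => rw [h] at heq; cases heq
  | case2 cs q tl h h2 =>
    have hq : q = '"' ∨ q = '\'' := by
      have hh := List.head_dropWhile_not (p := pvNotQuote) (l := cs)
      rw [h] at hh
      have := hh (by simp)
      simp [pvNotQuote] at this
      tauto
    have hsplit := List.takeWhile_append_dropWhile (p := pvNotQuote) (l := cs)
    rw [h] at hsplit
    have lhs_eq : pvOut cs =
        (cs.takeWhile pvNotQuote).map PySem.Chars.upperChar ++ q :: pvIn q tl := by
      conv_lhs => rw [← hsplit]
      rw [pvOut_append_of_notQuote _ _ (fun c hc => List.mem_takeWhile_imp hc)]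
      simp [pvOut, if_pos hq]
    have htl : tl.takeWhile (fun c => c ≠ q) = tl := by
      have hs := List.takeWhile_append_dropWhile (p := fun c => decide (c ≠ q)) (l := tl)
      rw [h2] at hs; simpa using hs
    rw [pvAltGo]
    split
    case _ heq => rw [h] at heq; cases heq
    case _ q' tl' heq =>
      rw [h] at heq
      injection heq with hq' htl'
      subst hq'; subst htl'
      split
      case _ heq2 =>
        rw [lhs_eq, pvIn_char, h2, htl]
        simp
      case _ d tl2 heq2 => rw [h2] at heq2; cases heq2
  | case3 cs q tl h d tl2 h2 ih =>
    have hq : q = '"' ∨ q = '\'' := by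
      have hh := List.head_dropWhile_not (p := pvNotQuote) (l := cs)
      rw [h] at hh
      have := hh (by simp)
      simp [pvNotQuote] at this
      tauto
    have hsplit := List.takeWhile_append_dropWhile (p := pvNotQuote) (l := cs)
    rw [h] at hsplit
    have lhs_eq : pvOut cs =
        (cs.takeWhile pvNotQuote).map PySem.Chars.upperChar ++ q :: pvIn q tl := by
      conv_lhs => rw [← hsplit]
      rw [pvOut_append_of_notQuote _ _ (fun c hc => List.mem_takeWhile_imp hc)]
      simp [pvOut, if_pos hq]
    rw [pvAltGo]
    split
    case _ heq => rw [h] at heq; cases heq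
    case _ q' tl' heq =>
      rw [h] at heq
      injection heq with hq' htl'
      subst hq'; subst htl'
      split
      case _ heq2 => rw [h2] at heq2; cases heq2
      case _ d' tl2' heq2 =>
        rw [h2] at heq2
        injection heq2 with _ htl2
        subst htl2
        rw [lhs_eq, pvIn_char, h2]
        simp [ih]

-- ===== VERDICT (by name: the statement is the Claim_ definition above) =====
theorem upper_preserve_strings_py_spec : Claim_equal_upper_preserve_strings_py := by
  intro line _
  show upper_preserve_strings_py line = upper_preserve_strings_py_alt line
  unfold upper_preserve_strings_py upper_preserve_strings_py_alt
  rw [(pvFold_eq line.toList).1 [] ' ', pvOut_eq_altGo]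
  simp
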